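-- pv_equiv track=rewrite | github.com/aieduvia111-beep/ai-teacher-backend | app/exam_pdf_generator.py | _fix_latex
-- ===== SOURCE A (Python) =====
-- def _fix_latex(tekst: str) -> str:
--     """Naprawia brakujące backslashe w LaTeX — prosta zamiana stringiem."""
--     if not tekst:
--         return tekst
--     # Lista komend które GPT gubi backslash przed
--     for cmd in ['frac', 'sqrt', 'cdot', 'times', 'div', 'sum', 'int',
--                 'alpha', 'beta', 'gamma', 'delta', 'pi', 'theta',
--                 'infty', 'leq', 'geq', 'neq', 'approx', 'pm',
--                 'left', 'right', 'text', 'mathrm', 'overline']: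
--         # Zamień " rac{" -> "\frac{" (gdy brak backslasha)
--         tekst = tekst.replace(' ' + cmd + '{', ' \\' + cmd + '{')
--         tekst = tekst.replace('$' + cmd + '{', '$\\' + cmd + '{')
--         tekst = tekst.replace('\n' + cmd + '{', '\n\\' + cmd + '{')
--     return tekst
-- ===== SOURCE B (Python) =====
-- def _fix_latex(tekst: str) -> str:
--     """Single left-to-right scan: after each ' ', '$' or '\n' that is immediately
--     followed by a known command name and '{', insert the missing backslash."""
--     if not tekst:
--         return tekst
--     cmds = ('frac', 'sqrt', 'cdot', 'times', 'div', 'sum', 'int',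
--             'alpha', 'beta', 'gamma', 'delta', 'pi', 'theta',
--             'infty', 'leq', 'geq', 'neq', 'approx', 'pm',
--             'left', 'right', 'text', 'mathrm', 'overline')
--     out = []
--     i = 0
--     n = len(tekst)
--     while i < n:
--         ch = tekst[i]
--         out.append(ch)
--         i += 1
--         if ch in ' $\n' and any(tekst.startswith(cmd + '{', i) for cmd in cmds):
--             out.append('\\')
--     return ''.join(out)
-- ===== Notes on version B (the rewrite author's own statement) =====
-- stated objective: alternative
-- what changed: A runs 24 commands x 3 prefixes = 72 sequential str.replace sweeps over the whole string; B does a single left-to-right scan that emits each character and inserts a backslash whenever a ' '/'$'/newline is immediately followed by a known command name and '{'.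
import Mathlib
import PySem

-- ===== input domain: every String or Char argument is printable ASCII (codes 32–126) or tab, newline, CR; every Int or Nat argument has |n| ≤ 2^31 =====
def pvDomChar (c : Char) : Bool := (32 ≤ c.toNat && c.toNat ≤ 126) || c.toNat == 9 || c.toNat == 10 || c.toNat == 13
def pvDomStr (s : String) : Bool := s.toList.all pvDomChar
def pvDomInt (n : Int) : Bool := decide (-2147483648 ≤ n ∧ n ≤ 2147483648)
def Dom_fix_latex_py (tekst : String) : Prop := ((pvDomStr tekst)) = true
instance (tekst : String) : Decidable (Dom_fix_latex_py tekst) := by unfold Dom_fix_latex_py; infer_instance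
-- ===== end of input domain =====

-- B replaces A's 24×3 sequential str.replace sweeps by one left-to-right scan that
-- inserts a backslash after each ' '/'$'/'\n' immediately followed by a command name and '{' (objective: alternative).


-- ===== PORT A =====
-- the command list of A's for-loop
def pvCmds : List String :=
  ["frac", "sqrt", "cdot", "times", "div", "sum", "int",
   "alpha", "beta", "gamma", "delta", "pi", "theta",
   "infty", "leq", "geq", "neq", "approx", "pm",
   "left", "right", "text", "mathrm", "overline"]

-- the body of A's for-loop: the three sequential str.replace calls for one cmd
def pvStepA (t : String) (cmd : String) : String :=
  let t := PySem.Str.replace t (" " ++ cmd ++ "{") (" \\" ++ cmd ++ "{")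
  let t := PySem.Str.replace t ("$" ++ cmd ++ "{") ("$\\" ++ cmd ++ "{")
  PySem.Str.replace t ("\n" ++ cmd ++ "{") ("\n\\" ++ cmd ++ "{")

def fix_latex_py (tekst : String) : String :=
  if tekst = "" then tekst
  else pvCmds.foldl pvStepA tekst

-- ===== PORT B =====
-- the same command tuple, as char lists
def pvCmdsC : List (List Char) := pvCmds.map String.toList

-- the while-loop of Source B: emit the current char, plus a '\' when the char is ' '/'$'/'\n'
-- and some command name followed by '{' starts right after it
def pvBGo : List Char → List Char
  | [] => []
  | c :: rest =>
    if (c == ' ' || c == '$' || c == '\n')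
        && pvCmdsC.any (fun w => (w ++ ['{']).isPrefixOf rest) then
      c :: '\\' :: pvBGo rest
    else
      c :: pvBGo rest

def fix_latex_py_alt (tekst : String) : String :=
  if tekst = "" then tekst
  else String.ofList (pvBGo tekst.toList)

-- ===== PRECONDITION & SPEC =====
def Spec_fix_latex_py (tekst : String) (out : String) : Prop := out = fix_latex_py_alt tekst
instance (tekst : String) (out : String) : Decidable (Spec_fix_latex_py tekst out) := by unfold Spec_fix_latex_py; infer_instance

-- ===== CLAIM (what is proved, stated in full; the proofs are below) =====
def Claim_equal_fix_latex_py : Prop := ∀ (tekst : String), Dom_fix_latex_py tekst → Spec_fix_latex_py tekst (fix_latex_py tekst)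

-- ===== LEMMAS AND PROOFS =====

-- single-trigger inserter: what one str.replace of A (pattern p·w·'{' → p·'\'·w·'{') does
def pvIns (p : Char) (w : List Char) : List Char → List Char
  | [] => []
  | c :: t =>
    if (p :: (w ++ ['{'])).isPrefixOf (c :: t) then
      p :: '\\' :: (w ++ '{' :: pvIns p w (t.drop (w.length + 1)))
    else
      c :: pvIns p w t
  termination_by s => s.length
  decreasing_by
  all_goals simp_all

-- multi-trigger scan: triggers are (prefix char, command) pairs
def pvTrig (T : List (Char × List Char)) (c : Char) (t : List Char) : Bool :=
  T.any (fun tr => c == tr.1 && (tr.2 ++ ['{']).isPrefixOf t)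

def pvScan (T : List (Char × List Char)) : List Char → List Char
  | [] => []
  | c :: t => if pvTrig T c t then c :: '\\' :: pvScan T t else c :: pvScan T t

def pvP (c : Char) : Prop := c = ' ' ∨ c = '$' ∨ c = '\n'

def pvGoodW (w : List Char) : Prop := ∀ c ∈ w, c ≠ '\\' ∧ c ≠ ' ' ∧ c ≠ '$' ∧ c ≠ '\n'

def pvTrio (w : List Char) : List (Char × List Char) := [(' ', w), ('$', w), ('\n', w)]

theorem pvScan_nil_trig (s : List Char) : pvScan [] s = s := by
  induction s with
  | nil => rfl
  | cons c t ih => simp [pvScan, pvTrig, ih]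

-- the scan copies a block containing no trigger prefix-chars verbatim
theorem pvScan_block (T : List (Char × List Char)) (u s : List Char)
    (h : ∀ c ∈ u, ∀ tr ∈ T, tr.1 ≠ c) :
    pvScan T (u ++ s) = u ++ pvScan T s := by
  induction u with
  | nil => rfl
  | cons c u ih =>
    have hc : pvTrig T c (u ++ s) = false := by
      simp only [pvTrig, List.any_eq_false]
      intro tr htr hb
      have hne := h c (by simp) tr htr
      rw [Bool.and_eq_true, beq_iff_eq] at hb
      exact hne hb.1.symm
    have ih' := ih (fun c hc => h c (by simp [hc]))
    rw [List.cons_append, pvScan, hc, ih']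
    simp

-- a backslash-free prefix of the scan output is a prefix of the input
theorem pvScan_prefix_back (T : List (Char × List Char)) :
    ∀ (s u : List Char), '\\' ∉ u → u <+: pvScan T s → u <+: s := by
  intro s
  induction s with
  | nil => intro u _ h; simpa [pvScan] using h
  | cons c t ih =>
    intro u hbs h
    cases u with
    | nil => exact List.nil_prefix
    | cons a u' =>
      by_cases htr : pvTrig T c t = true
      · simp only [pvScan, htr, if_true] at h
        obtain ⟨rfl, h2⟩ := (List.cons_prefix_cons).1 h
        cases u' with
        | nil => exact List.cons_prefix_cons.2 ⟨rfl, List.nil_prefix⟩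
        | cons b u'' =>
          obtain ⟨rfl, _⟩ := (List.cons_prefix_cons).1 h2
          exact absurd (by simp : ('\\':Char) ∈ a :: '\\' :: u'') hbs
      · simp only [pvScan, htr, if_false, Bool.false_eq_true] at h
        obtain ⟨rfl, h2⟩ := (List.cons_prefix_cons).1 h
        exact List.cons_prefix_cons.2 ⟨rfl, ih u' (fun hm => hbs (by simp [hm])) h2⟩

theorem pvGoodW_no_bs {w : List Char} (hw : pvGoodW w) : ('\\':Char) ∉ w ++ ['{'] := by
  intro hm
  rcases List.mem_append.1 hm with hm | hm
  · exact (hw _ hm).1 rfl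
  · simp at hm

-- the MAIN lemma: one more replace sweep on top of a scan output = the scan with one more trigger
theorem pvMain (p : Char) (w : List Char) (hp : pvP p) (hw : pvGoodW w) :
    ∀ (n : Nat) (T : List (Char × List Char)), (∀ tr ∈ T, pvP tr.1) →
      ∀ s : List Char, s.length ≤ n →
        pvIns p w (pvScan T s) = pvScan (T ++ [(p, w)]) s := by
  intro n
  induction n with
  | zero =>
    intro T _ s hs
    have : s = [] := List.eq_nil_of_length_eq_zero (Nat.le_zero.1 hs)
    subst this
    simp [pvScan, pvIns]
  | succ n ih =>
    intro T hT s hs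
    cases s with
    | nil => simp [pvScan, pvIns]
    | cons c t =>
      have htail : t.length ≤ n := by simpa using hs
      have hpP : p ≠ '\\' := by rcases hp with h | h | h <;> simp [h]
      have hwhead : ∀ (c' : Char) (X : List Char),
          (p :: (w ++ ['{'])).isPrefixOf (c' :: '\\' :: X) = false := by
        intro c' X
        apply Bool.eq_false_iff.2
        intro hpre
        have hpre' := List.isPrefixOf_iff_prefix.1 hpre
        obtain ⟨_, h2⟩ := List.cons_prefix_cons.1 hpre'
        cases w with
        | nil =>
          simp only [List.nil_append] at h2
          obtain ⟨hx, _⟩ := List.cons_prefix_cons.1 h2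
          exact absurd hx (by decide)
        | cons a w' =>
          obtain ⟨ha, _⟩ := List.cons_prefix_cons.1 (by simpa using h2)
          exact (hw a (by simp)).1 ha
      rcases Bool.eq_false_or_eq_true (pvTrig T c t) with htr | htr
      · -- an old trigger fires: both sides insert one backslash and continue
        have htr' : pvTrig (T ++ [(p, w)]) c t = true := by
          simp only [pvTrig, List.any_append] at htr ⊢
          simp [htr]
        simp only [pvScan, htr, htr', if_true]
        rw [pvIns.eq_2, hwhead]
        simp only [Bool.false_eq_true, if_false]
        rw [pvIns.eq_2]
        have hno : (p :: (w ++ ['{'])).isPrefixOf ('\\' :: pvScan T t) = false := by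
          apply Bool.eq_false_iff.2
          intro hpre2
          obtain ⟨h1, _⟩ := List.cons_prefix_cons.1 (List.isPrefixOf_iff_prefix.1 hpre2)
          exact hpP h1
        rw [hno]
        simp only [Bool.false_eq_true, if_false]
        rw [ih T hT t htail]
      · by_cases hnew : c = p ∧ (w ++ ['{']) <+: t
        · -- only the new trigger fires
          obtain ⟨hcp, hpre⟩ := hnew
          subst hcp
          obtain ⟨s2, rfl⟩ := hpre
          have hublock : ∀ c' ∈ w ++ ['{'], ∀ tr ∈ T ++ [(c, w)], tr.1 ≠ c' := by
            intro c' hc' tr htrm hbad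
            have hPtr : pvP tr.1 := by
              rcases List.mem_append.1 htrm with h | h
              · exact hT tr h
              · simp only [List.mem_singleton] at h
                subst h
                exact hp
            rcases List.mem_append.1 hc' with hm | hm
            · rcases hPtr with h | h | h
              · exact (hw c' hm).2.1 (hbad.symm.trans h)
              · exact (hw c' hm).2.2.1 (hbad.symm.trans h)
              · exact (hw c' hm).2.2.2 (hbad.symm.trans h)
            · simp only [List.mem_singleton] at hm
              subst hm
              rcases hPtr with h | h | h <;> rw [hbad] at h <;> exact absurd h (by decide)
          have hublockT : ∀ c' ∈ w ++ ['{'], ∀ tr ∈ T, tr.1 ≠ c' := by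
            intro c' hc' tr htrm
            exact hublock c' hc' tr (List.mem_append.2 (Or.inl htrm))
          have htr' : pvTrig (T ++ [(c, w)]) c (w ++ ['{'] ++ s2) = true := by
            simp only [pvTrig, List.any_append, List.any_cons, List.any_nil]
            simp [List.isPrefixOf_iff_prefix, List.append_assoc]
          have hs2 : s2.length ≤ n := by
            simp only [List.length_cons, List.length_append] at hs
            omega
          simp only [pvScan, htr, htr', if_true, Bool.false_eq_true, if_false]
          rw [pvScan_block T (w ++ ['{']) s2 hublockT,
              pvScan_block (T ++ [(c, w)]) (w ++ ['{']) s2 hublock]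
          rw [pvIns.eq_2]
          have hmatch : (c :: (w ++ ['{'])).isPrefixOf (c :: (w ++ ['{'] ++ pvScan T s2)) = true := by
            rw [List.isPrefixOf_iff_prefix]
            exact List.cons_prefix_cons.2 ⟨rfl, ⟨pvScan T s2, by simp⟩⟩
          rw [hmatch]
          simp only [if_true]
          have hdrop : List.drop (w.length + 1) (w ++ ['{'] ++ pvScan T s2) = pvScan T s2 := by
            rw [List.drop_append]
            simp
          rw [hdrop, ih T hT s2 hs2]
          simp
        · -- no trigger fires at all
          have htr' : pvTrig (T ++ [(p, w)]) c t = false := by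
            simp only [pvTrig, List.any_append, Bool.or_eq_false_iff]
            refine ⟨htr, ?_⟩
            simp only [List.any_cons, List.any_nil, Bool.or_false]
            apply Bool.and_eq_false_iff.2
            by_cases hc : c = p
            · right
              apply Bool.eq_false_iff.2
              intro hpre2
              exact hnew ⟨hc, List.isPrefixOf_iff_prefix.1 hpre2⟩
            · left
              simp only [beq_eq_false_iff_ne, ne_eq]
              exact hc
          simp only [pvScan, htr, htr', Bool.false_eq_true, if_false]
          rw [pvIns.eq_2]
          have hnom : (p :: (w ++ ['{'])).isPrefixOf (c :: pvScan T t) = false := by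
            apply Bool.eq_false_iff.2
            intro hpre2
            obtain ⟨h1, h2⟩ := List.cons_prefix_cons.1 (List.isPrefixOf_iff_prefix.1 hpre2)
            exact hnew ⟨h1.symm, pvScan_prefix_back T t _ (pvGoodW_no_bs hw) h2⟩
          rw [hnom]
          simp only [Bool.false_eq_true, if_false]
          rw [ih T hT t htail]

-- str.replace's fuelled loop, for a pattern p·w·'{' and replacement p·'\'·w·'{', is pvIns
theorem pvGo_eq (p : Char) (w : List Char) :
    ∀ (fuel : Nat) (l acc : List Char), l.length ≤ fuel →
      PySem.Chars.replace.go (p :: (w ++ ['{'])) (p :: '\\' :: (w ++ ['{'])) fuel l acc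
        = acc.reverse ++ pvIns p w l := by
  intro fuel
  induction fuel with
  | zero =>
    intro l acc hl
    have : l = [] := List.eq_nil_of_length_eq_zero (Nat.le_zero.1 hl)
    subst this
    rw [PySem.Chars.replace.go.eq_def]
    simp [pvIns]
  | succ fuel ih =>
    intro l acc hl
    cases l with
    | nil =>
      rw [PySem.Chars.replace.go.eq_def]
      simp [pvIns]
    | cons c t =>
      rw [PySem.Chars.replace.go.eq_def]
      simp only []
      rw [pvIns.eq_2]
      rcases Bool.eq_false_or_eq_true ((p :: (w ++ ['{'])).isPrefixOf (c :: t)) with hm | hm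
      · rw [hm]
        simp only [if_true]
        have hlen : (p :: (w ++ ['{'])).length = w.length + 2 := by simp
        have hdrop : List.drop (p :: (w ++ ['{'])).length (c :: t) = List.drop (w.length + 1) t := by
          rw [hlen, List.drop_succ_cons]
        rw [hdrop, ih _ _ (by simp at hl ⊢; omega)]
        simp
      · rw [hm]
        simp only [Bool.false_eq_true, if_false]
        rw [ih _ _ (by simpa using hl)]
        simp

theorem pvReplace_eq_ins (p : Char) (w s : List Char) :
    PySem.Chars.replace s (p :: (w ++ ['{'])) (p :: '\\' :: (w ++ ['{'])) = pvIns p w s := by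
  rw [PySem.Chars.replace]
  simp only [List.isEmpty_cons, Bool.false_eq_true, if_false]
  rw [pvGo_eq p w s.length s [] le_rfl]
  simp

-- the char-level version of pvStepA
def pvStepC (t : List Char) (w : List Char) : List Char :=
  pvIns '\n' w (pvIns '$' w (pvIns ' ' w t))

theorem pvStepA_toList (t cmd : String) :
    (pvStepA t cmd).toList = pvStepC t.toList cmd.toList := by
  have hsp : (" " ++ cmd ++ "{").toList = ' ' :: (cmd.toList ++ ['{']) := by
    simp [String.toList_append]
  have hsp' : (" \\" ++ cmd ++ "{").toList = ' ' :: '\\' :: (cmd.toList ++ ['{']) := by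
    simp [String.toList_append]
  have hdl : ("$" ++ cmd ++ "{").toList = '$' :: (cmd.toList ++ ['{']) := by
    simp [String.toList_append]
  have hdl' : ("$\\" ++ cmd ++ "{").toList = '$' :: '\\' :: (cmd.toList ++ ['{']) := by
    simp [String.toList_append]
  have hnl : ("\n" ++ cmd ++ "{").toList = '\n' :: (cmd.toList ++ ['{']) := by
    simp [String.toList_append]
  have hnl' : ("\n\\" ++ cmd ++ "{").toList = '\n' :: '\\' :: (cmd.toList ++ ['{']) := by
    simp [String.toList_append]
  rw [pvStepA]
  simp only [PySem.Str.toList_replace, hsp, hsp', hdl, hdl', hnl, hnl',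
    pvReplace_eq_ins, pvStepC]

theorem pvA_fold_toList :
    ∀ (cs : List String) (t : String),
      (cs.foldl pvStepA t).toList = List.foldl pvStepC t.toList (cs.map String.toList) := by
  intro cs
  induction cs with
  | nil => intro t; rfl
  | cons c cs ih =>
    intro t
    simp only [List.foldl_cons, List.map_cons]
    rw [ih, pvStepA_toList]

-- fold of the per-command sweeps = the scan with all triggers
theorem pvPipe :
    ∀ (cs : List (List Char)) (T : List (Char × List Char)) (s : List Char),
      (∀ w ∈ cs, pvGoodW w) → (∀ tr ∈ T, pvP tr.1) →
      List.foldl pvStepC (pvScan T s) cs = pvScan (T ++ cs.flatMap pvTrio) s := by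
  intro cs
  induction cs with
  | nil => intro T s _ _; simp
  | cons w cs ih =>
    intro T s hg hT
    have hw : pvGoodW w := hg w (by simp)
    have h1 := pvMain ' ' w (Or.inl rfl) hw s.length T hT s le_rfl
    have hT1 : ∀ tr ∈ T ++ [((' ' : Char), w)], pvP tr.1 := by
      intro tr htr
      rcases List.mem_append.1 htr with h | h
      · exact hT tr h
      · simp only [List.mem_singleton] at h; subst h; exact Or.inl rfl
    have h2 := pvMain '$' w (Or.inr (Or.inl rfl)) hw s.length (T ++ [(' ', w)]) hT1 s le_rfl
    have hT2 : ∀ tr ∈ T ++ [((' ' : Char), w)] ++ [(('$' : Char), w)], pvP tr.1 := by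
      intro tr htr
      rcases List.mem_append.1 htr with h | h
      · exact hT1 tr h
      · simp only [List.mem_singleton] at h; subst h; exact Or.inr (Or.inl rfl)
    have h3 := pvMain '\n' w (Or.inr (Or.inr rfl)) hw s.length
      (T ++ [(' ', w)] ++ [('$', w)]) hT2 s le_rfl
    have hT3 : ∀ tr ∈ T ++ pvTrio w, pvP tr.1 := by
      intro tr htr
      rcases List.mem_append.1 htr with h | h
      · exact hT tr h
      · simp only [pvTrio, List.mem_cons, List.not_mem_nil, or_false] at h
        rcases h with h | h | h <;> subst h
        · exact Or.inl rfl
        · exact Or.inr (Or.inl rfl)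
        · exact Or.inr (Or.inr rfl)
    have hstep : pvStepC (pvScan T s) w = pvScan (T ++ pvTrio w) s := by
      rw [pvStepC, h1, h2, h3, pvTrio]
      simp [List.append_assoc]
    simp only [List.foldl_cons, hstep]
    rw [ih (T ++ pvTrio w) s (fun w' hw' => hg w' (by simp [hw'])) hT3]
    simp [List.flatMap_cons, List.append_assoc]

-- B's scan condition = the 72-trigger condition
theorem pvTrig_flatMap (cs : List (List Char)) (c : Char) (t : List Char) :
    pvTrig (cs.flatMap pvTrio) c t
      = ((c == ' ' || c == '$' || c == '\n')
          && cs.any (fun w => (w ++ ['{']).isPrefixOf t)) := by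
  rw [pvTrig, List.any_flatMap]
  have hfun : (fun w => (pvTrio w).any fun tr => c == tr.1 && (tr.2 ++ ['{']).isPrefixOf t)
      = fun w => ((c == ' ' || c == '$' || c == '\n') && (w ++ ['{']).isPrefixOf t) := by
    funext w
    simp only [pvTrio, List.any_cons, List.any_nil, Bool.or_false]
    cases c == ' ' <;> cases c == '$' <;> cases c == '\n'
      <;> cases (w ++ ['{']).isPrefixOf t <;> rfl
  rw [hfun]
  cases hP : (c == ' ' || c == '$' || c == '\n')
  · simp
  · simp

theorem pvBGo_eq_scan (s : List Char) :
    pvBGo s = pvScan (pvCmdsC.flatMap pvTrio) s := by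
  induction s with
  | nil => rfl
  | cons c t ih =>
    rw [pvBGo, pvScan, pvTrig_flatMap, ih]

def pvGoodWb (w : List Char) : Bool :=
  w.all (fun c => !(c == '\\' || c == ' ' || c == '$' || c == '\n'))

theorem pvGoodWb_sound (w : List Char) (h : pvGoodWb w = true) : pvGoodW w := by
  intro c hc
  have hx := List.all_eq_true.1 h c hc
  simp only [Bool.not_eq_true', Bool.or_eq_false_iff, beq_eq_false_iff_ne, ne_eq] at hx
  exact ⟨hx.1.1.1, hx.1.1.2, hx.1.2, hx.2⟩

set_option maxRecDepth 8000 in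
theorem pvCmdsC_good : ∀ w ∈ pvCmdsC, pvGoodW w := by
  have hall : pvCmdsC.all pvGoodWb = true := by rfl
  intro w hw
  exact pvGoodWb_sound w (List.all_eq_true.1 hall w hw)

-- ===== VERDICT (by name: the statement is the Claim_ definition above) =====
theorem fix_latex_py_spec : Claim_equal_fix_latex_py := by
  intro tekst _
  unfold Spec_fix_latex_py fix_latex_py fix_latex_py_alt
  by_cases h : tekst = ""
  · simp [h]
  · simp only [h, if_false]
    rw [← String.toList_inj]
    rw [pvA_fold_toList]
    have hpipe := pvPipe pvCmdsC [] tekst.toList pvCmdsC_good (by simp)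
    rw [pvScan_nil_trig] at hpipe
    simp only [List.nil_append] at hpipe
    rw [show pvCmds.map String.toList = pvCmdsC from rfl, hpipe, ← pvBGo_eq_scan]
    simp
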